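-- pv_equiv track=rewrite | github.com/rooschristopher/qa_presentation | feature_flags/app.py | compute_feature_set
-- ===== SOURCE A (Python) =====
-- FEATURES = ["feature1", "feature2", "feature3"]  # Feature list for name lookup
--
-- def parse_indices(header_value):
--     """Parse header value as either a bitmask integer or comma-separated indices."""
--     if not header_value:
--         return set()
--     try:
--         bitmask = int(header_value)
--         indices = {i for i in range(len(FEATURES)) if bitmask & (1 << i)}
--         return indices
--     except ValueError:
--         indices = {int(i.strip()) for i in header_value.split(',') if i.strip().isdigit() and int(i.strip()) < len(FEATURES)}
--         return indices
--
-- def compute_feature_set(base_feature_set, enable=None, suppressed=None):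
--     """Compute the final feature set from base, enabled, and suppressed features."""
--     base_bitmask = int(base_feature_set)
--     enabled_indices = parse_indices(enable)
--     suppressed_indices = parse_indices(suppressed)
--
--     enabled_bitmask = sum(1 << i for i in enabled_indices)
--     suppressed_bitmask = sum(1 << i for i in suppressed_indices)
--     final_feature_set = (base_bitmask | enabled_bitmask) & ~suppressed_bitmask
--
--     return final_feature_set
-- ===== SOURCE B (Python) =====
-- FEATURES = ["feature1", "feature2", "feature3"]  # Feature list for name lookup
--
--
-- def _parse_mask(header_value):
--     """Parse header value directly into an integer bitmask (no index set)."""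
--     if not header_value:
--         return 0
--     try:
--         return int(header_value) & ((1 << len(FEATURES)) - 1)
--     except ValueError:
--         mask = 0
--         for token in header_value.split(','):
--             t = token.strip()
--             if t.isdigit() and int(t) < len(FEATURES):
--                 mask |= 1 << int(t)
--         return mask
--
--
-- def compute_feature_set(base_feature_set, enable=None, suppressed=None):
--     """Compute the final feature set from base, enabled, and suppressed features."""
--     return (int(base_feature_set) | _parse_mask(enable)) & ~_parse_mask(suppressed)
-- ===== Notes on version B (the rewrite author's own statement) =====
-- stated objective: simpler
-- what changed: Header parsing builds an integer bitmask directly (int-branch masks with & 7, comma-branch OR-accumulates 1<<n per valid token) instead of materialising a set of indices and summing 1<<i over it, so the set->bitmask round-trip disappears.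
import Mathlib
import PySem

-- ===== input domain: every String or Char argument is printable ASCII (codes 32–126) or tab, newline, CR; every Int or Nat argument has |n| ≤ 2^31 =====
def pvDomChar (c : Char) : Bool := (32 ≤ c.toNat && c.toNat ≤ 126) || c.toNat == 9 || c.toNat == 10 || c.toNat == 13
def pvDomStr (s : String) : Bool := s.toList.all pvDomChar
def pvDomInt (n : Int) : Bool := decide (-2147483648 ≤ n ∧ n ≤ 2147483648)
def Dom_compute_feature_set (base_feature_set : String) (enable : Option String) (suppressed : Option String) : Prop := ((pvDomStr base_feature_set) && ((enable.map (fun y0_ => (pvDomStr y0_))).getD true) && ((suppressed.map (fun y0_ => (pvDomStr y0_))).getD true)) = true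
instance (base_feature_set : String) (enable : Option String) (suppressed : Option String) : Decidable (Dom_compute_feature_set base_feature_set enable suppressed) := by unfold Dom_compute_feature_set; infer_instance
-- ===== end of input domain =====

-- B parses each header directly into an integer bitmask (int-branch: & 7; comma-branch: OR-accumulate
-- 1<<n per valid token) instead of building a set of indices and summing 1<<i over it — simpler, no set round-trip.


-- ===== PORT A =====
def FEATURES : List String := ["feature1", "feature2", "feature3"]

def parse_indices (header_value : Option String) : PySem.Set Int :=
  match header_value with
  | none => PySem.Set.empty
  | some hv =>
    if hv = "" then PySem.Set.empty
    else
      match PySem.Int.ofStr? hv with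
      | some bitmask =>
        PySem.Set.ofList ((PySem.List.pyRange 0 (FEATURES.length : Int) 1).filter
          (fun i => PySem.Int.band bitmask ((1 : Int) <<< (i.toNat : Int)) != 0))
      | none =>
        PySem.Set.ofList ((((PySem.Str.split? hv ",").getD []).filter
            (fun t => PySem.Str.strIsdigit (PySem.Str.strip t) &&
              decide ((PySem.Int.ofStr? (PySem.Str.strip t)).getD 0 < (FEATURES.length : Int)))).map
          (fun t => (PySem.Int.ofStr? (PySem.Str.strip t)).getD 0))

def compute_feature_set (base_feature_set : String) (enable : Option String) (suppressed : Option String) : Int :=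
  match PySem.Int.ofStr? base_feature_set with
  | none => 0  -- int(base_feature_set) raises ValueError here; excluded by Pre_
  | some base_bitmask =>
    let enabled_indices := parse_indices enable
    let suppressed_indices := parse_indices suppressed
    let enabled_bitmask := (enabled_indices.map (fun i => (1 : Int) <<< (i.toNat : Int))).sum
    let suppressed_bitmask := (suppressed_indices.map (fun i => (1 : Int) <<< (i.toNat : Int))).sum
    PySem.Int.band (PySem.Int.bor base_bitmask enabled_bitmask) (Int.not suppressed_bitmask)

-- ===== PORT B =====
def FEATURES_alt : List String := ["feature1", "feature2", "feature3"]

def parse_mask (header_value : Option String) : Int :=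
  match header_value with
  | none => 0
  | some hv =>
    if hv = "" then 0
    else
      match PySem.Int.ofStr? hv with
      | some b => PySem.Int.band b (((1 : Int) <<< (FEATURES_alt.length : Int)) - 1)
      | none =>
        ((PySem.Str.split? hv ",").getD []).foldl (fun mask token =>
          let t := PySem.Str.strip token
          if PySem.Str.strIsdigit t &&
              decide ((PySem.Int.ofStr? t).getD 0 < (FEATURES_alt.length : Int)) then
            PySem.Int.bor mask ((1 : Int) <<< ((((PySem.Int.ofStr? t).getD 0).toNat : Nat) : Int))
          else mask) 0

def compute_feature_set_alt (base_feature_set : String) (enable : Option String) (suppressed : Option String) : Int :=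
  match PySem.Int.ofStr? base_feature_set with
  | none => 0  -- int(base_feature_set) raises ValueError here; excluded by Pre_
  | some b =>
    PySem.Int.band (PySem.Int.bor b (parse_mask enable)) (Int.not (parse_mask suppressed))

-- ===== PRECONDITION & SPEC =====
-- Pre_ excludes exactly the inputs where int(base_feature_set) raises ValueError (A returns nothing there).
def Pre_compute_feature_set (base_feature_set : String) (enable : Option String) (suppressed : Option String) : Prop :=
  (PySem.Int.ofStr? base_feature_set).isSome = true
instance (base_feature_set : String) (enable : Option String) (suppressed : Option String) : Decidable (Pre_compute_feature_set base_feature_set enable suppressed) := by unfold Pre_compute_feature_set; infer_instance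

def pvWitness_compute_feature_set : String × Option String × Option String := ("5", some "1,2", some "6")

def Spec_compute_feature_set (base_feature_set : String) (enable : Option String) (suppressed : Option String) (out : Int) : Prop := out = compute_feature_set_alt base_feature_set enable suppressed
instance (base_feature_set : String) (enable : Option String) (suppressed : Option String) (out : Int) : Decidable (Spec_compute_feature_set base_feature_set enable suppressed out) := by unfold Spec_compute_feature_set; infer_instance

-- ===== CLAIM (what is proved, stated in full; the proofs are below) =====
def Claim_equal_compute_feature_set : Prop := ∀ (base_feature_set : String) (enable : Option String) (suppressed : Option String), Dom_compute_feature_set base_feature_set enable suppressed → Pre_compute_feature_set base_feature_set enable suppressed → Spec_compute_feature_set base_feature_set enable suppressed (compute_feature_set base_feature_set enable suppressed)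

-- ===== LEMMAS AND PROOFS =====

-- Nat bit facts used to split a bitwise AND into its three low bits
theorem nat_and_two (n : Nat) : n &&& 2 = 2 * (n / 2 % 2) := by
  have h2 : n / 2 % 2 = 0 ∨ n / 2 % 2 = 1 := by omega
  have := Nat.and_two_pow n 1
  rw [Nat.testBit_eq_decide_div_mod_eq] at this
  rcases h2 with h | h <;> rw [h] at this <;> norm_num at this <;> omega

theorem nat_and_four (n : Nat) : n &&& 4 = 4 * (n / 4 % 2) := by
  have h2 : n / 4 % 2 = 0 ∨ n / 4 % 2 = 1 := by omega
  have := Nat.and_two_pow n 2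
  rw [Nat.testBit_eq_decide_div_mod_eq] at this
  rcases h2 with h | h <;> rw [h] at this <;> norm_num at this <;> omega

theorem nat_and_seven (n : Nat) : n &&& 7 = n % 8 := by
  have := Nat.and_two_pow_sub_one_eq_mod n 3
  norm_num at this; omega

theorem band_one_cases (b : Int) : PySem.Int.band b 1 = 0 ∨ PySem.Int.band b 1 = 1 := by
  unfold PySem.Int.band
  by_cases hb : 0 ≤ b <;> simp [hb] <;> omega

theorem band_two_cases (b : Int) : PySem.Int.band b 2 = 0 ∨ PySem.Int.band b 2 = 2 := by
  unfold PySem.Int.band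
  by_cases hb : 0 ≤ b <;> simp [hb]
  · rw [nat_and_two]; omega
  · rw [Nat.and_comm, nat_and_two]; omega

theorem band_four_cases (b : Int) : PySem.Int.band b 4 = 0 ∨ PySem.Int.band b 4 = 4 := by
  unfold PySem.Int.band
  by_cases hb : 0 ≤ b <;> simp [hb]
  · rw [nat_and_four]; omega
  · rw [Nat.and_comm, nat_and_four]; omega

theorem band_seven_decomp (b : Int) :
    PySem.Int.band b 7 = PySem.Int.band b 1 + PySem.Int.band b 2 + PySem.Int.band b 4 := by
  unfold PySem.Int.band
  by_cases hb : 0 ≤ b <;> simp [hb]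
  · rw [nat_and_seven, nat_and_two, nat_and_four]; omega
  · rw [Nat.and_comm 7, Nat.and_comm 2, Nat.and_comm 4, nat_and_seven, nat_and_two, nat_and_four]
    omega

-- the int branch: A's filtered-range set, summed as powers of two, is b & 7
theorem intBranchSum (b : Int) :
    ((PySem.Set.ofList ((PySem.List.pyRange 0 3 1).filter
        (fun i => PySem.Int.band b ((1 : Int) <<< (i.toNat : Int)) != 0))).map
      (fun i => (1 : Int) <<< (i.toNat : Int))).sum = PySem.Int.band b 7 := by
  have hr : PySem.List.pyRange 0 3 1 = [(0:Int), 1, 2] := by decide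
  rw [hr]
  norm_num [List.filter, bne]
  rw [show ((1:Int) <<< (0:Int)) = 1 by decide, show ((1:Int) <<< (1:Int)) = 2 by decide,
      show ((1:Int) <<< (2:Int)) = 4 by decide, band_seven_decomp b]
  rcases band_one_cases b with h1 | h1 <;> rcases band_two_cases b with h2 | h2 <;>
    rcases band_four_cases b with h4 | h4 <;>
    · rw [h1, h2, h4]
      decide

-- digit characters are not int() whitespace
theorem isdigit_not_space (c : Char) (h : PySem.Chars.isdigit c = true) :
    PySem.Int.isIntSpace c = false := by
  simp [PySem.Chars.isdigit] at h
  simp [PySem.Int.isIntSpace]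
  and_intros <;> rintro rfl <;> revert h <;> decide

theorem nonneg_aux (m : Option Nat) :
    0 ≤ (Option.map (fun n => n) (do let a ← m; pure ((a : Nat) : Int))).getD 0 := by
  cases m <;> simp

-- int() of a digit-only string is nonnegative
theorem digit_nonneg (cs : List Char) (h : PySem.Chars.strIsdigit cs = true) :
    0 ≤ (PySem.Int.ofChars? cs).getD 0 := by
  simp [PySem.Chars.strIsdigit, List.all_eq_true] at h
  obtain ⟨hne, hall⟩ := h
  unfold PySem.Int.ofChars?
  have hd1 : (cs.dropWhile PySem.Int.isIntSpace) = cs := by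
    cases cs with
    | nil => rfl
    | cons c rest =>
      rw [List.dropWhile_cons_of_neg]
      simp [isdigit_not_space c (hall c (by simp))]
  have hd2 : (cs.reverse.dropWhile PySem.Int.isIntSpace) = cs.reverse := by
    cases hrev : cs.reverse with
    | nil => rfl
    | cons c rest =>
      rw [List.dropWhile_cons_of_neg]
      have : c ∈ cs := by
        have : c ∈ cs.reverse := by rw [hrev]; simp
        simpa using this
      simp [isdigit_not_space c (hall c this)]
  rw [hd1, hd2, List.reverse_reverse]
  dsimp only
  split
  · exfalso
    have := hall '-' (by simp)
    revert this; decide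
  · exact nonneg_aux _
  · exact nonneg_aux _

def mval (a b c : Bool) : Int :=
  (if a then 1 else 0) + (if b then 2 else 0) + (if c then 4 else 0)

-- a guarded fold is the fold over the filtered, mapped list
theorem foldl_filter_map {α β γ : Type} (p : α → Bool) (v : α → β) (g : γ → β → γ)
    (toks : List α) (init : γ) :
    toks.foldl (fun acc x => if p x then g acc (v x) else acc) init
      = ((toks.filter p).map v).foldl g init := by
  induction toks generalizing init with
  | nil => rfl
  | cons t ts ih =>
    by_cases h : p t <;> simp [h, ih]

-- a nodup list of indices in {0,1,2} summed as powers of two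
theorem setSum_mval (s : List Int) (hnd : s.Nodup) (hm : ∀ n ∈ s, n = 0 ∨ n = 1 ∨ n = 2) :
    (s.map (fun i => (1 : Int) <<< (i.toNat : Int))).sum
      = mval (decide ((0 : Int) ∈ s)) (decide ((1 : Int) ∈ s)) (decide ((2 : Int) ∈ s)) := by
  induction s with
  | nil => simp [mval]
  | cons n s ih =>
    obtain ⟨hn, hnd'⟩ := List.nodup_cons.mp hnd
    have ihs := ih hnd' (fun m hm' => hm m (List.mem_cons_of_mem _ hm'))
    have e0 : (1:Int) <<< (((0:Int)).toNat : Int) = 1 := by decide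
    have e1 : (1:Int) <<< (((1:Int)).toNat : Int) = 2 := by decide
    have e2 : (1:Int) <<< (((2:Int)).toNat : Int) = 4 := by decide
    rcases hm n (List.mem_cons_self) with rfl | rfl | rfl <;>
      · simp only [List.map_cons, List.sum_cons, ihs, List.mem_cons, e0, e1, e2]
        simp only [mval]
        simp [hn]
        split_ifs <;> simp_all

-- B's OR-fold over indices in {0,1,2}
theorem orFold_mval (L : List Int) (hm : ∀ n ∈ L, n = 0 ∨ n = 1 ∨ n = 2) :
    ∀ a b c : Bool,
      L.foldl (fun m n => PySem.Int.bor m ((1 : Int) <<< (n.toNat : Int))) (mval a b c)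
        = mval (a || decide ((0 : Int) ∈ L)) (b || decide ((1 : Int) ∈ L)) (c || decide ((2 : Int) ∈ L)) := by
  induction L with
  | nil => simp
  | cons n L ih =>
    intro a b c
    have ihs := ih (fun m hm' => hm m (List.mem_cons_of_mem _ hm'))
    rcases hm n (List.mem_cons_self) with rfl | rfl | rfl
    · rw [List.foldl_cons,
        show PySem.Int.bor (mval a b c) ((1:Int) <<< (((0:Int)).toNat : Int)) = mval true b c from by
          revert a b c; decide, ihs]
      simp [List.mem_cons]
    · rw [List.foldl_cons,
        show PySem.Int.bor (mval a b c) ((1:Int) <<< (((1:Int)).toNat : Int)) = mval a true c from by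
          revert a b c; decide, ihs]
      simp [List.mem_cons]
    · rw [List.foldl_cons,
        show PySem.Int.bor (mval a b c) ((1:Int) <<< (((2:Int)).toNat : Int)) = mval a b true from by
          revert a b c; decide, ihs]
      simp [List.mem_cons]

-- the comma branch: A's set of valid indices summed as powers of two is B's OR-fold
theorem commaBranchSum (toks : List String) :
    ((PySem.Set.ofList ((toks.filter
        (fun t => PySem.Str.strIsdigit (PySem.Str.strip t) &&
          decide ((PySem.Int.ofStr? (PySem.Str.strip t)).getD 0 < (3 : Int)))).map
      (fun t => (PySem.Int.ofStr? (PySem.Str.strip t)).getD 0))).map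
        (fun i => (1 : Int) <<< (i.toNat : Int))).sum
      = toks.foldl (fun mask token =>
          let t := PySem.Str.strip token
          if PySem.Str.strIsdigit t && decide ((PySem.Int.ofStr? t).getD 0 < (3 : Int)) then
            PySem.Int.bor mask ((1 : Int) <<< ((((PySem.Int.ofStr? t).getD 0).toNat : Nat) : Int))
          else mask) 0 := by
  have hL : ∀ n ∈ ((toks.filter
        (fun t => PySem.Str.strIsdigit (PySem.Str.strip t) &&
          decide ((PySem.Int.ofStr? (PySem.Str.strip t)).getD 0 < (3 : Int)))).map
      (fun t => (PySem.Int.ofStr? (PySem.Str.strip t)).getD 0)), n = 0 ∨ n = 1 ∨ n = 2 := by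
    intro n hn
    obtain ⟨t, ht, rfl⟩ := List.mem_map.mp hn
    have hc := List.of_mem_filter ht
    have hdig : PySem.Str.strIsdigit (PySem.Str.strip t) = true :=
      (Bool.and_eq_true _ _).mp hc |>.1
    have hlt : (PySem.Int.ofStr? (PySem.Str.strip t)).getD 0 < 3 :=
      of_decide_eq_true ((Bool.and_eq_true _ _).mp hc |>.2)
    have hge : 0 ≤ (PySem.Int.ofStr? (PySem.Str.strip t)).getD 0 := by
      have hdig' : PySem.Chars.strIsdigit (PySem.Str.strip t).toList = true := by
        rw [← PySem.Str.strIsdigit_eq]; exact hdig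
      simpa [PySem.Int.ofStr?] using digit_nonneg _ hdig'
    omega
  have hRHS : (toks.foldl (fun mask token =>
          let t := PySem.Str.strip token
          if PySem.Str.strIsdigit t && decide ((PySem.Int.ofStr? t).getD 0 < (3 : Int)) then
            PySem.Int.bor mask ((1 : Int) <<< ((((PySem.Int.ofStr? t).getD 0).toNat : Nat) : Int))
          else mask) 0)
      = ((toks.filter
        (fun t => PySem.Str.strIsdigit (PySem.Str.strip t) &&
          decide ((PySem.Int.ofStr? (PySem.Str.strip t)).getD 0 < (3 : Int)))).map
      (fun t => (PySem.Int.ofStr? (PySem.Str.strip t)).getD 0)).foldl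
        (fun m n => PySem.Int.bor m ((1 : Int) <<< (n.toNat : Int))) 0 :=
    foldl_filter_map
      (fun t => PySem.Str.strIsdigit (PySem.Str.strip t) &&
        decide ((PySem.Int.ofStr? (PySem.Str.strip t)).getD 0 < (3 : Int)))
      (fun t => (PySem.Int.ofStr? (PySem.Str.strip t)).getD 0)
      (fun m n => PySem.Int.bor m ((1 : Int) <<< (n.toNat : Int))) toks 0
  have hfold := orFold_mval _ hL false false false
  simp only [Bool.false_or] at hfold
  rw [show mval false false false = (0 : Int) from by decide] at hfold
  rw [hRHS, hfold,
     setSum_mval _ (PySem.Set.nodup_ofList _) (fun n hn => hL n ((PySem.Set.mem_ofList _ _).mp hn))]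
  simp only [PySem.Set.mem_ofList]

-- the central lemma: A's parsed set, summed as powers of two, is B's mask
theorem parse_eq (h : Option String) :
    ((parse_indices h).map (fun i => (1 : Int) <<< (i.toNat : Int))).sum = parse_mask h := by
  cases h with
  | none => rfl
  | some hv =>
    simp only [parse_indices, parse_mask]
    by_cases he : hv = ""
    · simp [he]
    · rw [if_neg he, if_neg he]
      cases ho : PySem.Int.ofStr? hv with
      | some b => exact intBranchSum b
      | none => exact commaBranchSum _

-- ===== VERDICT (by name: the statement is the Claim_ definition above) =====
theorem compute_feature_set_spec : Claim_equal_compute_feature_set := by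
  intro base enable suppressed _ _
  unfold Spec_compute_feature_set compute_feature_set compute_feature_set_alt
  cases PySem.Int.ofStr? base with
  | none => rfl
  | some b => simp only [parse_eq]
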